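-- pv_equiv track=rewrite | github.com/welshonionman/atmaCup_18 | src/feature_extract/semantic.py | merge_vehicle_labels
-- ===== SOURCE A (Python) =====
-- def merge_vehicle_labels(id2label: dict) -> dict:
--     """車両関係のラベルをcarに統一"""
--     vehicle_labels = {
--         "20": "car",  # car (基準)
--         "80": "car",  # bus
--         "83": "car",  # truck
--         "102": "car",  # van
--         "103": "car",  # ship
--         "116": "car",  # minibike
--         "127": "car",  # bicycle
--     }
--
--     new_id2label = id2label.copy()
--
--     for vehicle_id in vehicle_labels:
--         if vehicle_id in new_id2label:
--             new_id2label[vehicle_id] = "car"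
--
--     return new_id2label
-- ===== SOURCE B (Python) =====
-- VEHICLE_IDS = frozenset({"20", "80", "83", "102", "103", "116", "127"})
--
--
-- def merge_vehicle_labels(id2label: dict) -> dict:
--     """車両関係のラベルをcarに統一"""
--     return {k: ("car" if k in VEHICLE_IDS else v) for k, v in id2label.items()}
-- ===== Notes on version B (the rewrite author's own statement) =====
-- stated objective: simpler
-- what changed: Instead of copying the dict and overwriting 7 fixed keys after membership tests, B builds the result in one dict comprehension over all items, mapping each key through a frozenset membership test; the traversal is over the input dict rather than over the fixed 7-key table.
import Mathlib
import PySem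

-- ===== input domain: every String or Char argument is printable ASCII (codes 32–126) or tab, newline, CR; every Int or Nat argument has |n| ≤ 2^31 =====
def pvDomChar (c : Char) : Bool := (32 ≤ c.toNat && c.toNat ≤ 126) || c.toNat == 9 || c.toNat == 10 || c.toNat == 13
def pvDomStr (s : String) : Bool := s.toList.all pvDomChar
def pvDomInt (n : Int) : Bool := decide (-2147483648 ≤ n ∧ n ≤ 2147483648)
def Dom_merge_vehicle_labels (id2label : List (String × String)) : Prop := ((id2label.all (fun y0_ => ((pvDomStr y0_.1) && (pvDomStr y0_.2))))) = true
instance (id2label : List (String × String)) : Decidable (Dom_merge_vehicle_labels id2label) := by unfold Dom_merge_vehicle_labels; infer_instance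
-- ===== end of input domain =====

-- B replaces A's copy-then-overwrite of 7 fixed keys by a single comprehension over the
-- input dict with a set-membership test; objective: simpler, same values and order.


-- ===== PORT A =====
def merge_vehicle_labels (id2label : List (String × String)) : List (String × String) :=
  let vehicle_labels : PySem.Dict String String :=
    PySem.Dict.ofList [("20", "car"), ("80", "car"), ("83", "car"), ("102", "car"),
                       ("103", "car"), ("116", "car"), ("127", "car")]
  let new_id2label : PySem.Dict String String := PySem.Dict.mk id2label
  let final := vehicle_labels.keys.foldl
    (fun d vehicle_id => if d.contains vehicle_id then d.insert vehicle_id "car" else d)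
    new_id2label
  final.items

-- ===== PORT B =====
def pvVehicleIds : PySem.Set String :=
  PySem.Set.ofList ["20", "80", "83", "102", "103", "116", "127"]

def merge_vehicle_labels_alt (id2label : List (String × String)) : List (String × String) :=
  id2label.map (fun p => if p.1 ∈ pvVehicleIds then (p.1, "car") else p)

-- ===== PRECONDITION & SPEC =====
def Spec_merge_vehicle_labels (id2label : List (String × String)) (out : List (String × String)) : Prop := out = merge_vehicle_labels_alt id2label
instance (id2label : List (String × String)) (out : List (String × String)) : Decidable (Spec_merge_vehicle_labels id2label out) := by unfold Spec_merge_vehicle_labels; infer_instance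

-- ===== CLAIM (what is proved, stated in full; the proofs are below) =====
def Claim_equal_merge_vehicle_labels : Prop := ∀ (id2label : List (String × String)), Dom_merge_vehicle_labels id2label → Spec_merge_vehicle_labels id2label (merge_vehicle_labels id2label)

-- ===== LEMMAS AND PROOFS =====

-- A's loop over a list of ids, folding a conditional overwrite through the dict,
-- has the same items as a single map with a membership test.
theorem pv_fold_items (L : List String) (xs : List (String × String)) :
    (L.foldl (fun d vid => if d.contains vid then d.insert vid "car" else d)
      (PySem.Dict.mk xs)).items
    = xs.map (fun p => if p.1 ∈ L then (p.1, "car") else p) := by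
  induction L generalizing xs with
  | nil => simp
  | cons v L ih =>
    simp only [List.foldl_cons]
    by_cases hc : (PySem.Dict.mk xs).contains v = true
    · have hins : (PySem.Dict.mk xs).insert v "car"
          = PySem.Dict.mk (xs.map (fun p => if p.1 == v then (v, "car") else p)) := by
        apply PySem.Dict.ext
        simp [PySem.Dict.items_insert, hc]
      rw [hc, if_pos rfl, hins, ih, List.map_map]
      apply List.map_congr_left
      intro p _
      by_cases hv : p.1 = v
      · simp [Function.comp, hv]
      · simp [Function.comp, hv, beq_iff_eq]
    · have hnk : ∀ p ∈ xs, p.1 ≠ v := by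
        intro p hp hpv
        have hk : v ∈ (PySem.Dict.mk xs).keys := by
          have hm : p.1 ∈ xs.map Prod.fst := List.mem_map_of_mem hp
          rw [hpv] at hm
          simpa [PySem.Dict.keys] using hm
        rw [← PySem.Dict.contains_iff_mem_keys] at hk
        exact hc hk
      rw [if_neg (by simp [hc]), ih]
      apply List.map_congr_left
      intro p hp
      simp [hnk p hp]

-- ===== VERDICT (by name: the statement is the Claim_ definition above) =====
theorem merge_vehicle_labels_spec : Claim_equal_merge_vehicle_labels := by
  intro id2label _
  show merge_vehicle_labels id2label = merge_vehicle_labels_alt id2label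
  show ((PySem.Dict.ofList [(("20" : String), ("car" : String)), ("80", "car"), ("83", "car"),
        ("102", "car"), ("103", "car"), ("116", "car"), ("127", "car")]).keys.foldl
      (fun d vehicle_id => if d.contains vehicle_id then d.insert vehicle_id "car" else d)
      (PySem.Dict.mk id2label)).items
    = id2label.map (fun p => if p.1 ∈ pvVehicleIds then (p.1, "car") else p)
  rw [show (PySem.Dict.ofList [(("20" : String), ("car" : String)), ("80", "car"), ("83", "car"),
        ("102", "car"), ("103", "car"), ("116", "car"), ("127", "car")]).keys
      = ["20", "80", "83", "102", "103", "116", "127"] from by decide]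
  rw [pv_fold_items]
  apply List.map_congr_left
  intro p _
  have : (p.1 ∈ ["20", "80", "83", "102", "103", "116", "127"]) ↔ p.1 ∈ pvVehicleIds := by
    rw [show pvVehicleIds = ["20", "80", "83", "102", "103", "116", "127"] from by decide]
  simp only [this]
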